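-- pv_equiv track=rewrite | github.com/microsoft/vscode-python-devicesimulator | src/microbit/model/image.py | __string_directly_to_array
-- ===== SOURCE A (Python) =====
-- def __string_directly_to_array(pattern):
--     # The result may have spaces in the 2D array
--     # and may uneven sub-array lengths
--     arr = []
--     sub_arr = []
--
--     max_subarray_len = 0
--
--     for elem in pattern:
--         if elem == ":" or elem == "\n":
--             if len(sub_arr) > max_subarray_len:
--                 max_subarray_len = len(sub_arr)
--             arr.append(sub_arr)
--             sub_arr = []
--         else:
--             sub_arr.append(int(elem))
--
--     if (
--         len(pattern) > 0
--         and not str(pattern)[-1] == ":"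
--         and not str(pattern)[-1] == "\n"
--         and len(sub_arr) != 0
--     ):
--         if len(sub_arr) > max_subarray_len:
--             max_subarray_len = len(sub_arr)
--         arr.append(sub_arr)
--
--     return arr, max_subarray_len
-- ===== SOURCE B (Python) =====
-- def __string_directly_to_array(pattern):
--     # Split-then-map pipeline: one split into row strings, drop a trailing
--     # empty segment (trailing ':'/'\n' or empty input), then parse each row.
--     rows = pattern.replace("\n", ":").split(":")
--     if rows[-1] == "":
--         rows.pop()
--     arr = [[int(c) for c in row] for row in rows]
--     return arr, max(map(len, arr), default=0)
-- ===== Notes on version B (the rewrite author's own statement) =====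
-- stated objective: idiomatic
-- what changed: Replaced the per-character state machine (manual sub-array accumulator, running max and a four-way trailing-character guard) by a split-then-map pipeline: split the pattern on ':'/'\n' in one step, drop the single trailing empty segment, map rows to int lists and take the max length.
import Mathlib
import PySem

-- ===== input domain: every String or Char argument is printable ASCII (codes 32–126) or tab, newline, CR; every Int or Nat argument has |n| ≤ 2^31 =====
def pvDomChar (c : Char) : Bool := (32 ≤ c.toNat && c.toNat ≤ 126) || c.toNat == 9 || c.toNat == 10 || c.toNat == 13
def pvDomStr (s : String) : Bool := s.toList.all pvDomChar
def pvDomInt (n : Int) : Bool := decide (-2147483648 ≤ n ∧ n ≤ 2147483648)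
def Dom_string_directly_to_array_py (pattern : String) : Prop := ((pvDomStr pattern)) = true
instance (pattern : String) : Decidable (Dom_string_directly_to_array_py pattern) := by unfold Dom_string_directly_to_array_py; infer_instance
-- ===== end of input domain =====

-- B replaces A's per-character state machine by a split-then-map pipeline (idiomatic; same cost).

-- int(c) for a single character: exact for digit characters; Pre_ below restricts
-- the input to digits and the delimiters ':' / '\n' (elsewhere Python's int() raises).
def pvDigitInt (c : Char) : Int := (c.toNat : Int) - 48

-- ===== PORT A =====
-- the for-loop of A: state = (arr, sub_arr, max_subarray_len)
def pvLoopA : List Char → List (List Int) × List Int × Int → List (List Int) × List Int × Int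
  | [], st => st
  | c :: cs, (arr, sub, m) =>
    if c = ':' ∨ c = '\n' then
      pvLoopA cs (arr ++ [sub], [], if (sub.length : Int) > m then (sub.length : Int) else m)
    else
      pvLoopA cs (arr, sub ++ [pvDigitInt c], m)

def string_directly_to_array_py (pattern : String) : List (List Int) × Int :=
  let st := pvLoopA pattern.toList ([], [], 0)
  let arr := st.1
  let sub := st.2.1
  let m := st.2.2
  -- pattern[-1] on a nonempty string is its last character
  if pattern.toList ≠ [] ∧ ¬ pattern.toList.getLast? = some ':' ∧
       ¬ pattern.toList.getLast? = some '\n' ∧ sub ≠ [] then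
    (arr ++ [sub], if (sub.length : Int) > m then (sub.length : Int) else m)
  else
    (arr, m)

-- ===== PORT B =====
-- hand port of str.split(":") (exact for a one-character separator): "".split(":") = ['']
def pvSplitColon : List Char → List (List Char)
  | [] => [[]]
  | c :: cs => if c = ':' then [] :: pvSplitColon cs else (pvSplitColon cs).modifyHead (c :: ·)

def string_directly_to_array_py_alt (pattern : String) : List (List Int) × Int :=
  -- pattern.replace("\n", ":") for one-character old/new is a character map
  let rows := pvSplitColon (pattern.toList.map (fun c => if c = '\n' then ':' else c))
  -- rows is nonempty (split always returns ≥ 1 piece); rows[-1] == "" → rows.pop()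
  let rows := if rows.getLast? = some [] then rows.dropLast else rows
  let arr := rows.map (fun r => r.map pvDigitInt)
  (arr, ((arr.map List.length).foldl max 0 : Nat))

-- ===== PRECONDITION & SPEC =====
-- Pre_ excludes exactly the inputs on which A raises ValueError: int(elem) is applied
-- to every non-delimiter character, so the pattern must consist of digits, ':' and '\n'.
def Pre_string_directly_to_array_py (pattern : String) : Prop :=
  pattern.toList.all (fun c => c.isDigit || c = ':' || c = '\n') = true
instance (pattern : String) : Decidable (Pre_string_directly_to_array_py pattern) := by
  unfold Pre_string_directly_to_array_py; infer_instance

def pvWitness_string_directly_to_array_py : String := "90:123:\n4"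

def Spec_string_directly_to_array_py (pattern : String) (out : List (List Int) × Int) : Prop := out = string_directly_to_array_py_alt pattern
instance (pattern : String) (out : List (List Int) × Int) : Decidable (Spec_string_directly_to_array_py pattern out) := by unfold Spec_string_directly_to_array_py; infer_instance

-- ===== CLAIM (what is proved, stated in full; the proofs are below) =====
def Claim_equal_string_directly_to_array_py : Prop := ∀ (pattern : String), Dom_string_directly_to_array_py pattern → Pre_string_directly_to_array_py pattern → Spec_string_directly_to_array_py pattern (string_directly_to_array_py pattern)

-- ===== LEMMAS AND PROOFS =====

-- the segments A's loop closes, already parsed, starting from accumulator `sub`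
def pvSegs : List Char → List Int → List (List Int)
  | [], sub => [sub]
  | c :: cs, sub =>
    if c = ':' ∨ c = '\n' then sub :: pvSegs cs [] else pvSegs cs (sub ++ [pvDigitInt c])

def pvFoldMax (m : Int) (rs : List (List Int)) : Int :=
  rs.foldl (fun m r => if (r.length : Int) > m then (r.length : Int) else m) m

theorem pvSegs_ne_nil : ∀ (l : List Char) (sub : List Int), pvSegs l sub ≠ [] := by
  intro l
  induction l with
  | nil => intro sub; simp [pvSegs]
  | cons c cs ih =>
    intro sub
    simp only [pvSegs]
    split
    · simp
    · exact ih _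

theorem pvSplitColon_ne_nil (l : List Char) : pvSplitColon l ≠ [] := by
  cases l with
  | nil => simp [pvSplitColon]
  | cons c cs =>
    simp only [pvSplitColon]; split
    · simp
    · cases h : pvSplitColon cs with
      | nil => exact absurd h (pvSplitColon_ne_nil cs)
      | cons y ys => simp [List.modifyHead]

-- A's loop, characterized by pvSegs
theorem pvLoopA_eq (l : List Char) : ∀ (arr : List (List Int)) (sub : List Int) (m : Int),
    pvLoopA l (arr, sub, m) =
      (arr ++ (pvSegs l sub).dropLast, (pvSegs l sub).getLast (pvSegs_ne_nil l sub),
        pvFoldMax m ((pvSegs l sub).dropLast)) := by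
  induction l with
  | nil => intro arr sub m; simp [pvLoopA, pvSegs, pvFoldMax]
  | cons c cs ih =>
    intro arr sub m
    by_cases hc : c = ':' ∨ c = '\n'
    · cases hQ : pvSegs cs [] with
      | nil => exact absurd hQ (pvSegs_ne_nil cs [])
      | cons q qs =>
        have h1 : pvSegs (c :: cs) sub = sub :: q :: qs := by
          simp [pvSegs, if_pos hc, hQ]
        simp only [pvLoopA, if_pos hc, ih, hQ, h1, Prod.mk.injEq]
        refine ⟨by simp, by simp [List.getLast_cons], ?_⟩
        simp [pvFoldMax]
    · simp only [pvLoopA, pvSegs, if_neg hc, ih]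

theorem pvModifyNil (X : List (List Int)) :
    X.modifyHead (fun x => ([] : List Int) ++ x) = X := by
  cases X <;> simp [List.modifyHead]

-- pvSegs is split-then-map, with `sub` prepended to the first row
theorem pvSegs_eq_split (l : List Char) : ∀ (sub : List Int),
    pvSegs l sub =
      ((pvSplitColon (l.map (fun c => if c = '\n' then ':' else c))).map
        (fun r => r.map pvDigitInt)).modifyHead (sub ++ ·) := by
  induction l with
  | nil => intro sub; simp [pvSegs, pvSplitColon, List.modifyHead]
  | cons c cs ih =>
    intro sub
    by_cases hc : c = ':' ∨ c = '\n'
    · have hf : (if c = '\n' then ':' else c) = ':' := by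
        rcases hc with h | h <;> simp [h]
      simp only [pvSegs, if_pos hc, List.map_cons, hf]
      rw [show pvSplitColon (':' :: (cs.map fun c => if c = '\n' then ':' else c))
            = [] :: pvSplitColon (cs.map fun c => if c = '\n' then ':' else c) from by
          simp [pvSplitColon]]
      simp only [List.map_cons, List.modifyHead]
      rw [ih [], pvModifyNil]
      simp
    · rcases not_or.mp hc with ⟨hc1, hc2⟩
      have hf : (if c = '\n' then ':' else c) = c := by simp [hc2]
      have hred : pvSplitColon ((c :: cs).map (fun c => if c = '\n' then ':' else c))
          = (pvSplitColon (cs.map (fun c => if c = '\n' then ':' else c))).modifyHead (c :: ·) := by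
        simp [List.map_cons, hf, pvSplitColon, hc1]
      simp only [pvSegs, if_neg hc, hred]
      rw [ih (sub ++ [pvDigitInt c])]
      cases h : pvSplitColon (cs.map (fun c => if c = '\n' then ':' else c)) with
      | nil => exact absurd h (pvSplitColon_ne_nil _)
      | cons y ys => simp [List.modifyHead, List.append_assoc]

-- helper: ':' occurring in l forces at least two pieces
theorem pvSplitColon_two_of_mem (l : List Char) (h : (':' : Char) ∈ l) :
    2 ≤ (pvSplitColon l).length := by
  induction l with
  | nil => simp at h
  | cons c cs ih =>
    by_cases hc : c = ':'
    · subst hc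
      have h1 : pvSplitColon (':' :: cs) = [] :: pvSplitColon cs := by simp [pvSplitColon]
      rw [h1]
      cases hq : pvSplitColon cs with
      | nil => exact absurd hq (pvSplitColon_ne_nil cs)
      | cons y ys => simp
    · have hm : (':' : Char) ∈ cs := by
        rcases List.mem_cons.mp h with h' | h'
        · exact absurd h'.symm hc
        · exact h'
      have h2 := ih hm
      have h1 : pvSplitColon (c :: cs)
          = (pvSplitColon cs).modifyHead (c :: ·) := by simp [pvSplitColon, hc]
      rw [h1]
      cases hq : pvSplitColon cs with
      | nil => exact absurd hq (pvSplitColon_ne_nil cs)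
      | cons y ys => rw [hq] at h2; simpa [List.modifyHead] using h2

theorem pvMem_of_getLast? {α : Type} {l : List α} {a : α} (h : l.getLast? = some a) :
    a ∈ l := by
  cases l with
  | nil => simp at h
  | cons b bs =>
    have hb : (b :: bs).getLast (List.cons_ne_nil b bs) = a := by
      have := List.getLast?_eq_getLast (l := b :: bs) (List.cons_ne_nil b bs)
      rw [this] at h
      exact (Option.some_inj.mp h)
    rw [← hb]
    exact List.getLast_mem _

-- the last piece is empty iff the input is empty or ends in a delimiter
theorem pvSplit_last_empty (l : List Char) :
    ((pvSplitColon (l.map (fun c => if c = '\n' then ':' else c))).getLast? = some []) ↔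
      (l = [] ∨ l.getLast? = some ':' ∨ l.getLast? = some '\n') := by
  induction l with
  | nil => simp [pvSplitColon]
  | cons c cs ih =>
    by_cases hc : c = ':' ∨ c = '\n'
    · have hf : (if c = '\n' then ':' else c) = ':' := by
        rcases hc with h | h <;> simp [h]
      have hred : pvSplitColon ((c :: cs).map (fun c => if c = '\n' then ':' else c))
          = [] :: pvSplitColon (cs.map (fun c => if c = '\n' then ':' else c)) := by
        simp [List.map_cons, hf, pvSplitColon]
      rw [hred]
      cases cs with
      | nil => rcases hc with h | h <;> subst h <;> simp [pvSplitColon]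
      | cons d ds =>
        cases hL : pvSplitColon ((d :: ds).map (fun c => if c = '\n' then ':' else c)) with
        | nil => exact absurd hL (pvSplitColon_ne_nil _)
        | cons y ys =>
          rw [List.getLast?_cons_cons, ← hL, ih]
          simp [List.getLast?_cons_cons]
    · rcases not_or.mp hc with ⟨hc1, hc2⟩
      have hf : (if c = '\n' then ':' else c) = c := by simp [hc2]
      cases cs with
      | nil =>
        have hred : pvSplitColon ([c].map (fun c => if c = '\n' then ':' else c)) = [[c]] := by
          simp [hf, pvSplitColon, hc1, List.modifyHead]
        rw [hred]
        simp [hc1, hc2]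
      | cons d ds =>
        have hred : pvSplitColon ((c :: d :: ds).map (fun c => if c = '\n' then ':' else c))
            = (pvSplitColon ((d :: ds).map (fun c => if c = '\n' then ':' else c))).modifyHead
                (c :: ·) := by
          simp [List.map_cons, hf, pvSplitColon, hc1]
        cases hL : pvSplitColon ((d :: ds).map (fun c => if c = '\n' then ':' else c)) with
        | nil => exact absurd hL (pvSplitColon_ne_nil _)
        | cons y ys =>
          cases ys with
          | nil =>
            -- single piece: the mapped tail contains no ':', so d::ds ends in no delimiter
            have hnomem : (':' : Char) ∉ (d :: ds).map (fun c => if c = '\n' then ':' else c) := by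
              intro hm
              have h2 := pvSplitColon_two_of_mem _ hm
              rw [hL] at h2; simp at h2
            rw [hred, hL]
            constructor
            · intro habs; simp [List.modifyHead] at habs
            · rintro (h | h | h)
              · exact absurd h (List.cons_ne_nil _ _)
              · rw [List.getLast?_cons_cons] at h
                exact absurd (List.mem_map.mpr ⟨':', pvMem_of_getLast? h, by simp⟩) hnomem
              · rw [List.getLast?_cons_cons] at h
                exact absurd (List.mem_map.mpr ⟨'\n', pvMem_of_getLast? h, by simp⟩) hnomem
          | cons z zs =>
            rw [hred, hL]
            have h1 : (List.modifyHead (fun x => c :: x) (y :: z :: zs)).getLast?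
                = (y :: z :: zs).getLast? := by
              simp [List.modifyHead, List.getLast?_cons_cons]
            rw [h1, ← hL, ih]
            simp [List.getLast?_cons_cons]

-- A's running max equals B's fold of max over the row lengths
theorem pvFoldMax_eq (rs : List (List Int)) : ∀ (m : Nat),
    pvFoldMax (m : Int) rs = (((rs.map List.length).foldl max m : Nat) : Int) := by
  induction rs with
  | nil => intro m; simp [pvFoldMax]
  | cons r rest ih =>
    intro m
    have step : (if ((r.length : Int) > (m : Int)) then (r.length : Int) else (m : Int))
        = ((max m r.length : Nat) : Int) := by
      split_ifs with h
      · have : m ≤ r.length := by exact_mod_cast Int.le_of_lt h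
        simp [Nat.max_eq_right this]
      · have : r.length ≤ m := by exact_mod_cast not_lt.mp h
        simp [Nat.max_eq_left this]
    simp only [pvFoldMax, List.foldl, List.map_cons] at *
    rw [step, ih]

theorem pvMap_ne_nil_iff (r : List Char) : r.map pvDigitInt = [] ↔ r = [] := by
  cases r <;> simp

-- ===== VERDICT (by name: the statement is the Claim_ definition above) =====
theorem string_directly_to_array_py_spec : Claim_equal_string_directly_to_array_py := by
  intro pattern _ _
  unfold Spec_string_directly_to_array_py
  unfold string_directly_to_array_py string_directly_to_array_py_alt
  set l := pattern.toList with hl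
  set L := pvSplitColon (l.map (fun c => if c = '\n' then ':' else c)) with hLdef
  have hLne : L ≠ [] := pvSplitColon_ne_nil _
  have hsegs : pvSegs l [] = L.map (fun r => r.map pvDigitInt) := by
    rw [pvSegs_eq_split l []]
    exact pvModifyNil _
  rw [pvLoopA_eq]
  simp only [List.nil_append]
  by_cases hcond : l = [] ∨ l.getLast? = some ':' ∨ l.getLast? = some '\n'
  · -- trailing empty segment: B drops it, A never appends `sub`
    have hLast : L.getLast? = some [] := (pvSplit_last_empty l).mpr hcond
    have hguard : ¬ (l ≠ [] ∧ ¬ l.getLast? = some ':' ∧ ¬ l.getLast? = some '\n' ∧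
        (pvSegs l []).getLast (pvSegs_ne_nil l []) ≠ []) := by
      rintro ⟨h1, h2, h3, _⟩
      rcases hcond with h | h | h
      · exact h1 h
      · exact h2 h
      · exact h3 h
    rw [if_neg hguard, if_pos hLast]
    simp only [Prod.mk.injEq]
    refine ⟨?_, ?_⟩
    · rw [hsegs, ← List.map_dropLast]
    · rw [hsegs, ← List.map_dropLast]
      simpa using pvFoldMax_eq (L.dropLast.map (fun r => r.map pvDigitInt)) 0
  · -- last row kept: A appends `sub`, B keeps the last piece
    rcases not_or.mp hcond with ⟨h1, hrest⟩
    rcases not_or.mp hrest with ⟨h2, h3⟩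
    have hLast : ¬ L.getLast? = some [] := by
      intro h
      rcases (pvSplit_last_empty l).mp h with h' | h' | h'
      · exact h1 h'
      · exact h2 h'
      · exact h3 h'
    have hcanL : L.getLast? = some (L.getLast hLne) := List.getLast?_eq_getLast hLne
    have hsubval : (pvSegs l []).getLast (pvSegs_ne_nil l []) =
        (L.getLast hLne).map pvDigitInt := by
      have hq : (pvSegs l []).getLast? = some ((L.getLast hLne).map pvDigitInt) := by
        rw [hsegs, List.getLast?_map, hcanL]; simp
      have hcan : (pvSegs l []).getLast? =
          some ((pvSegs l []).getLast (pvSegs_ne_nil l [])) :=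
        List.getLast?_eq_getLast (pvSegs_ne_nil l [])
      rw [hcan] at hq
      exact Option.some_inj.mp hq
    have hsubne : (pvSegs l []).getLast (pvSegs_ne_nil l []) ≠ [] := by
      rw [hsubval]
      intro h
      have h' := (pvMap_ne_nil_iff _).mp h
      apply hLast
      rw [hcanL, h']
    rw [if_pos ⟨h1, h2, h3, hsubne⟩, if_neg hLast]
    have hsplit : L.dropLast ++ [L.getLast hLne] = L := List.dropLast_append_getLast hLne
    have hfull : (L.dropLast.map fun r => r.map pvDigitInt) ++ [(L.getLast hLne).map pvDigitInt]
        = L.map (fun r => r.map pvDigitInt) := by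
      conv_rhs => rw [← hsplit]
      simp
    have hdrop : (pvSegs l []).dropLast = L.dropLast.map (fun r => r.map pvDigitInt) := by
      rw [hsegs, ← List.map_dropLast]
    simp only [Prod.mk.injEq]
    refine ⟨?_, ?_⟩
    · rw [hdrop, hsubval, hfull]
    · rw [hsubval, hdrop]
      have hstep : (if (((L.getLast hLne).map pvDigitInt).length : Int) >
            pvFoldMax 0 (L.dropLast.map fun r => r.map pvDigitInt)
          then (((L.getLast hLne).map pvDigitInt).length : Int)
          else pvFoldMax 0 (L.dropLast.map fun r => r.map pvDigitInt))
          = pvFoldMax 0 ((L.dropLast.map fun r => r.map pvDigitInt)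
              ++ [(L.getLast hLne).map pvDigitInt]) := by
        simp [pvFoldMax, List.foldl_append]
      rw [hstep, hfull]
      simpa using pvFoldMax_eq (L.map (fun r => r.map pvDigitInt)) 0
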